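-- pv_equiv track=rewrite | github.com/Nightmare044/python-online-marathon | sprint01/task06.py | checkVisibleZeroes
-- ===== SOURCE A (Python) =====
-- def checkVisibleZeroes(N):
--     points = 0
--     for i in N:
--         if i in "069":
--             points += 1
--         elif i in "8":
--             points += 2
--
--     return points
-- ===== SOURCE B (Python) =====
-- def checkVisibleZeroes(N):
--     if not N:
--         return 0
--     if len(N) == 1:
--         c = N[0]
--         if c == '8':
--             return 2
--         if c in ('0', '6', '9'):
--             return 1
--         return 0
--     m = len(N) // 2
--     return checkVisibleZeroes(N[:m]) + checkVisibleZeroes(N[m:])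
-- ===== Notes on version B (the rewrite author's own statement) =====
-- stated objective: alternative
-- what changed: Replaces A's accumulating left-to-right pass with branch tests by a divide-and-conquer recursion: split the string in halves, recurse, and add the two hole counts, with per-character base cases.
import Mathlib
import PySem

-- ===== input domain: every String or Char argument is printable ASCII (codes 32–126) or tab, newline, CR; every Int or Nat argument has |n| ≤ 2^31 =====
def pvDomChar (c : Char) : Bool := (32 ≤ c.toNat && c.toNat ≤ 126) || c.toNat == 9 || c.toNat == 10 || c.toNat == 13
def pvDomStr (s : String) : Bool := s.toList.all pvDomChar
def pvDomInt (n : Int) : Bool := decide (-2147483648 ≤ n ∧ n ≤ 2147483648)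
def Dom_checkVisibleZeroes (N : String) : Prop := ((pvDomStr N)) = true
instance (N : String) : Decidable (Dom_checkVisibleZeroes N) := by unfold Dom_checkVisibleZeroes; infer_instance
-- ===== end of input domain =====

-- B replaces A's accumulating single pass by a divide-and-conquer recursion on string halves (alternative decomposition, same cost); equal on all strings.

-- ===== PORT A =====
def checkVisibleZeroes (N : String) : Int :=
  N.toList.foldl (fun points i =>
    if PySem.Str.isIn (String.ofList [i]) "069" then points + 1
    else if PySem.Str.isIn (String.ofList [i]) "8" then points + 2
    else points) 0

-- ===== PORT B =====
-- recursion of Source B on the string's character list; N[0] is headD (length = 1 guaranteed),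
-- N[:m]/N[m:] at m = len//2 are take/drop
def checkVisibleZeroesAltGo (cs : List Char) : Int :=
  if _h0 : cs.length = 0 then 0
  else if _h1 : cs.length = 1 then
    if cs.headD ' ' = '8' then 2
    else if cs.headD ' ' = '0' ∨ cs.headD ' ' = '6' ∨ cs.headD ' ' = '9' then 1
    else 0
  else
    checkVisibleZeroesAltGo (cs.take (cs.length / 2))
      + checkVisibleZeroesAltGo (cs.drop (cs.length / 2))
termination_by cs.length
decreasing_by
  · simp only [List.length_take]; omega
  · simp only [List.length_drop]; omega

def checkVisibleZeroes_alt (N : String) : Int := checkVisibleZeroesAltGo N.toList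

-- ===== PRECONDITION & SPEC =====
def Spec_checkVisibleZeroes (N : String) (out : Int) : Prop := out = checkVisibleZeroes_alt N
instance (N : String) (out : Int) : Decidable (Spec_checkVisibleZeroes N out) := by unfold Spec_checkVisibleZeroes; infer_instance

-- ===== CLAIM =====
def Claim_equal_checkVisibleZeroes : Prop := ∀ (N : String), Dom_checkVisibleZeroes N → Spec_checkVisibleZeroes N (checkVisibleZeroes N)

-- ===== LEMMAS AND PROOFS =====

-- per-character hole weight: the common value both programs sum
def pvHoleW (c : Char) : Int :=
  if c = '0' ∨ c = '6' ∨ c = '9' then 1 else if c = '8' then 2 else 0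

theorem isIn_singleton (c : Char) (s : List Char) :
    PySem.Chars.isIn [c] s = s.contains c := by
  by_cases h : c ∈ s
  · simp only [List.contains_eq_mem, h, decide_true]
    rw [PySem.Chars.isIn_iff_infix]
    obtain ⟨l, r, rfl⟩ := List.append_of_mem h
    exact ⟨l, r, by simp⟩
  · simp only [List.contains_eq_mem, h, decide_false]
    rw [PySem.Chars.isIn_eq_false_iff]
    intro hinf
    exact h (hinf.subset (List.mem_singleton_self c))

theorem foldl_holes (cs : List Char) (acc : Int) :
    cs.foldl (fun points i =>
      if i ∈ (['0', '6', '9'] : List Char) then points + 1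
      else if i ∈ (['8'] : List Char) then points + 2
      else points) acc
    = acc + (cs.map pvHoleW).sum := by
  induction cs generalizing acc with
  | nil => simp
  | cons x t ih =>
    simp only [List.foldl_cons, List.map_cons, List.sum_cons]
    rw [ih]
    simp only [List.mem_cons, List.not_mem_nil, or_false]
    unfold pvHoleW
    split_ifs <;> simp_all <;> ring

theorem altGo_eq (cs : List Char) :
    checkVisibleZeroesAltGo cs = (cs.map pvHoleW).sum := by
  fun_induction checkVisibleZeroesAltGo cs
  case case1 cs h0 =>
      rw [List.length_eq_zero_iff] at h0; simp [h0]
  case case2 cs h0 h1 hc =>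
      rw [List.length_eq_one_iff] at h1
      obtain ⟨c, rfl⟩ := h1
      simp only [List.headD_cons] at hc
      subst hc
      decide
  case case3 cs h0 h1 hc8 hc069 =>
      rw [List.length_eq_one_iff] at h1
      obtain ⟨c, rfl⟩ := h1
      simp only [List.headD_cons] at hc069
      rcases hc069 with rfl | rfl | rfl <;> decide
  case case4 cs h0 h1 hc8 hc069 =>
      rw [List.length_eq_one_iff] at h1
      obtain ⟨c, rfl⟩ := h1
      simp only [List.headD_cons] at hc8 hc069
      simp only [List.map_cons, List.map_nil, List.sum_cons, List.sum_nil, add_zero]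
      unfold pvHoleW
      rw [if_neg hc069, if_neg hc8]
  case case5 cs h0 h1 ih1 ih2 =>
      rw [ih1, ih2, ← List.sum_append, ← List.map_append, List.take_append_drop]

-- ===== VERDICT =====
theorem checkVisibleZeroes_spec : Claim_equal_checkVisibleZeroes := by
  intro N _
  unfold Spec_checkVisibleZeroes checkVisibleZeroes checkVisibleZeroes_alt
  rw [altGo_eq]
  simp only [PySem.Str.isIn,
    show ("069" : String).toList = ['0', '6', '9'] from rfl,
    show ("8" : String).toList = ['8'] from rfl,
    String.toList_ofList, isIn_singleton, List.contains_eq_mem, decide_eq_true_eq]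
  rw [foldl_holes]
  ring
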